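-- pv_equiv track=rewrite | github.com/blackms/myTelegramBot | myTelegramBot/modules/nmap_plugin.py | __check_for_idiot_friends
-- ===== SOURCE A (Python) =====
-- def __check_for_idiot_friends(text):
--     import string
--     if text is None or len(text) <= 0:
--         return False
--
--     valid_chars = "-_.,%s%s" % (string.ascii_letters, string.digits)
--     if len(''.join(c for c in text if c in valid_chars)) != len(text):
--         return True
--     return False
-- ===== SOURCE B (Python) =====
-- import re
--
-- def __check_for_idiot_friends(text):
--     if text is None or len(text) <= 0:
--         return False
--     return bool(re.search(r'[^-_.,A-Za-z0-9]', text))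
-- ===== Notes on version B (the rewrite author's own statement) =====
-- stated objective: idiomatic
-- what changed: Replaces building a filtered copy of the string and comparing lengths with a single regex search for one character outside the allowed class.
import Mathlib
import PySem

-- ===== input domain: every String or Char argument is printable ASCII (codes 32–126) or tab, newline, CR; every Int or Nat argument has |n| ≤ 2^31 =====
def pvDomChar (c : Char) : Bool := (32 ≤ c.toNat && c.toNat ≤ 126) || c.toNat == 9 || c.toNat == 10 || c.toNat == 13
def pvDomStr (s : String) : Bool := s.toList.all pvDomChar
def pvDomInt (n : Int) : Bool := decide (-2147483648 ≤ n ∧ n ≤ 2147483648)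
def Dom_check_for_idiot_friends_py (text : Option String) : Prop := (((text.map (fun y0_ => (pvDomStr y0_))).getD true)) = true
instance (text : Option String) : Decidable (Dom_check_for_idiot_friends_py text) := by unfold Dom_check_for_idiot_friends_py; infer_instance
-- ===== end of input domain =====

-- B replaces A's build-a-filtered-copy-and-compare-lengths scan with a single search
-- for one character outside the allowed class (re.search in Python, List.any here).

-- ===== PORT A =====
-- valid_chars = "-_.,%s%s" % (string.ascii_letters, string.digits)
def pvValidChars : List Char :=
  "-_.,".toList ++ "abcdefghijklmnopqrstuvwxyzABCDEFGHIJKLMNOPQRSTUVWXYZ".toList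
    ++ "0123456789".toList

def check_for_idiot_friends_py (text : Option String) : Bool :=
  match text with
  | none => false                                   -- text is None
  | some s =>
    if s.toList.length ≤ 0 then false               -- len(text) <= 0
    else if (s.toList.filter (fun c => pvValidChars.contains c)).length ≠ s.toList.length
      then true
      else false

-- ===== PORT B =====
-- the regex character class [^-_.,A-Za-z0-9]: true iff c's code point is outside
-- the allowed set (regex classes compare code points; exact on all of Char)
def pvDisallowed (c : Char) : Bool :=
  let n := c.toNat
  !(n == 45 || n == 95 || n == 46 || n == 44 ||
    (65 ≤ n && n ≤ 90) || (97 ≤ n && n ≤ 122) || (48 ≤ n && n ≤ 57))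

def check_for_idiot_friends_py_alt (text : Option String) : Bool :=
  match text with
  | none => false                                   -- text is None
  | some s =>
    if s.toList.length ≤ 0 then false               -- len(text) <= 0
    else s.toList.any pvDisallowed                  -- bool(re.search(r'[^-_.,A-Za-z0-9]', text))

-- ===== PRECONDITION & SPEC =====
def Spec_check_for_idiot_friends_py (text : Option String) (out : Bool) : Prop := out = check_for_idiot_friends_py_alt text
instance (text : Option String) (out : Bool) : Decidable (Spec_check_for_idiot_friends_py text out) := by unfold Spec_check_for_idiot_friends_py; infer_instance

-- ===== CLAIM (what is proved, stated in full; the proofs are below) =====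
def Claim_equal_check_for_idiot_friends_py : Prop := ∀ (text : Option String), Dom_check_for_idiot_friends_py text → Spec_check_for_idiot_friends_py text (check_for_idiot_friends_py text)

-- ===== LEMMAS AND PROOFS =====

-- the code points of A's valid_chars string
def pvValidNats : List Nat := pvValidChars.map Char.toNat

lemma pvValidNats_key : ∀ n < 127, pvValidNats.contains n =
    (n == 45 || n == 95 || n == 46 || n == 44 ||
     (65 ≤ n && n ≤ 90) || (97 ≤ n && n ≤ 122) || (48 ≤ n && n ≤ 57)) := by
  set_option maxRecDepth 4000 in decide

lemma char_toNat_inj {a b : Char} (h : a.toNat = b.toNat) : a = b :=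
  Char.ext (UInt32.toNat_inj.mp h)

-- per-character agreement of the two membership tests, on domain characters
lemma pvKey (c : Char) (h : pvDomChar c = true) :
    pvValidChars.contains c = !pvDisallowed c := by
  have h126 : c.toNat ≤ 126 := by
    simp only [pvDomChar, Bool.or_eq_true, Bool.and_eq_true, decide_eq_true_eq,
      beq_iff_eq] at h
    omega
  have h1 : pvValidChars.contains c = pvValidNats.contains c.toNat := by
    rw [Bool.eq_iff_iff]
    simp only [List.contains_iff_mem, pvValidNats, List.mem_map]
    exact ⟨fun hm => ⟨c, hm, rfl⟩, fun ⟨a, ha, he⟩ => (char_toNat_inj he) ▸ ha⟩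
  rw [h1, pvDisallowed, Bool.not_not]
  exact pvValidNats_key c.toNat (by omega)

-- ===== VERDICT (by name: the statement is the Claim_ definition above) =====
theorem check_for_idiot_friends_py_spec : Claim_equal_check_for_idiot_friends_py := by
  intro text hdom
  unfold Spec_check_for_idiot_friends_py
  match text with
  | none => rfl
  | some s =>
    have hall : ∀ c ∈ s.toList, pvDomChar c = true := by
      simpa [Dom_check_for_idiot_friends_py, pvDomStr, List.all_eq_true] using hdom
    simp only [check_for_idiot_friends_py, check_for_idiot_friends_py_alt]
    by_cases hl : s.toList.length ≤ 0
    · rw [if_pos hl, if_pos hl]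
    · rw [if_neg hl, if_neg hl]
      have hfilt : (s.toList.filter fun c => pvValidChars.contains c)
          = s.toList.filter fun c => !pvDisallowed c :=
        List.filter_congr (fun c hc => pvKey c (hall c hc))
      rw [hfilt]
      cases hany : s.toList.any pvDisallowed with
      | false =>
        have hself : (s.toList.filter fun c => !pvDisallowed c) = s.toList := by
          refine List.filter_eq_self.mpr ?_
          intro a ha
          have := List.any_eq_false.mp hany a ha
          simp_all
        rw [hself]
        simp
      | true =>
        obtain ⟨x, hx, hpx⟩ := List.any_eq_true.mp hany
        have hlt : (s.toList.filter fun c => !pvDisallowed c).length < s.toList.length :=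
          List.length_filter_lt_length_iff_exists.mpr ⟨x, hx, by simp [hpx]⟩
        rw [if_pos (Nat.ne_of_lt hlt)]
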